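-- pv_equiv track=rewrite | github.com/soob511/algostudy | 2023/0424_쿼드압축 후 개수 세기/PS_쿼드압축 후 개수 세기_이길상.py | quadzip
-- ===== SOURCE A (Python) =====
-- def quadzip(arr, x, y, d):
--     # 사이즈가 1일 경우
--     if d == 1:
--         return [arr[x][y]]
--
--     # 구역 4개로 나누어 재귀 적용
--     result = []
--     for nx in range(x, x+d, d//2):
--         for ny in range(y, y+d, d//2):
--             result.extend(quadzip(arr, nx, ny, d//2))
--
--     # 압축되는지 확인
--     if len(result) == 4:
--         if sum(result) == 0:
--             return [0]
--         if sum(result) == 4: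
--             return [1]
--
--     return result
-- ===== SOURCE B (Python) =====
-- # Bottom-up alternative: build the grid of 1x1 compressed blocks, then repeatedly
-- # merge 2x2 neighbourhoods level by level until one block remains (no recursion).
-- def quadzip(arr, x, y, d):
--     level = [[[arr[x + i][y + j]] for j in range(d)] for i in range(d)]
--     n = d
--     while n > 1:
--         n //= 2
--         level = [[_merge(level[2 * i][2 * j], level[2 * i][2 * j + 1],
--                          level[2 * i + 1][2 * j], level[2 * i + 1][2 * j + 1])
--                   for j in range(n)] for i in range(n)]
--     return level[0][0]
--
-- def _merge(a, b, c, e):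
--     r = a + b + c + e
--     if len(r) == 4:
--         s = sum(r)
--         if s == 0:
--             return [0]
--         if s == 4:
--             return [1]
--     return r
-- ===== Notes on version B (the rewrite author's own statement) =====
-- stated objective: alternative
-- what changed: A compresses the block by top-down recursion into four quadrants; B is non-recursive bottom-up dynamic programming: it materialises the d*d grid of 1x1 compressed blocks and repeatedly merges 2x2 neighbourhoods level by level until one block remains. Pre_ excludes non-power-of-two d, on which A's overlapping 3x3-of-quadrants recursion is an accident of range(x, x+d, d//2) and no quadtree decomposition exists.
import Mathlib
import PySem

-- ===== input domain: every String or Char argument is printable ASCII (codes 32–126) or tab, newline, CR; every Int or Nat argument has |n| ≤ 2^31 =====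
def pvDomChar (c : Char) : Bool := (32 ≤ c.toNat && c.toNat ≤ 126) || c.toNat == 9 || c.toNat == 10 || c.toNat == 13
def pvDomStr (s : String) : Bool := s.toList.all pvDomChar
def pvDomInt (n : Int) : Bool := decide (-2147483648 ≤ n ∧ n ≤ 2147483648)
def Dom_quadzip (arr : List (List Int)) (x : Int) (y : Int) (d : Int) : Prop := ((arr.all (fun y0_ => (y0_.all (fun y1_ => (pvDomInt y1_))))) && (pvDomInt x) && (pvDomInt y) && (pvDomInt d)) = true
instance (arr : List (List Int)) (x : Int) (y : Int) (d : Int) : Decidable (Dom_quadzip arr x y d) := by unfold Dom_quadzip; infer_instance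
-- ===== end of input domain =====

-- B replaces A's top-down quadrant recursion by bottom-up level-by-level merging (same cost); equivalence is proved on Pre_ (d a power of two, every touched cell a valid Python index).

-- ===== PORT A =====
def quadzip (arr : List (List Int)) (x : Int) (y : Int) (d : Int) : List Int :=
  if d = 1 then
    -- arr[x][y]; pyGet? none = IndexError (excluded by Pre_), .getD 0 is never the result there
    [((PySem.List.pyGet? arr x).bind (fun row => PySem.List.pyGet? row y)).getD 0]
  else if d < 2 then
    -- Python raises (d = 0: range step 0) or recurses forever (d < 0); outside Pre_
    []
  else
    let s := PySem.Int.floordiv d 2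
    let result := (PySem.List.pyRange x (x + d) s).foldl (fun acc nx =>
      (PySem.List.pyRange y (y + d) s).foldl (fun acc2 ny =>
        acc2 ++ quadzip arr nx ny s) acc) []
    if result.length = 4 then
      if result.sum = 0 then [0]
      else if result.sum = 4 then [1]
      else result
    else result
termination_by d.toNat
decreasing_by
  have h : PySem.Int.floordiv d 2 = d / 2 := PySem.Int.floordiv_eq_ediv_of_pos (by omega)
  simp only [h]; omega

-- ===== PORT B =====
def quadmerge (a b c e : List Int) : List Int :=
  let r := a ++ b ++ c ++ e
  if r.length = 4 then
    if r.sum = 0 then [0]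
    else if r.sum = 4 then [1]
    else r
  else r

-- level[i][j]; pyGet? none = IndexError in Python (never hit inside Pre_)
def quadidx (lv : List (List (List Int))) (i j : Int) : List Int :=
  (PySem.List.pyGet? ((PySem.List.pyGet? lv i).getD []) j).getD []

def quadloop (n : Int) (level : List (List (List Int))) : List (List (List Int)) :=
  if n ≤ 1 then level
  else
    let m := PySem.Int.floordiv n 2
    quadloop m ((PySem.List.pyRange 0 m 1).map (fun i =>
      (PySem.List.pyRange 0 m 1).map (fun j =>
        quadmerge (quadidx level (2 * i) (2 * j)) (quadidx level (2 * i) (2 * j + 1))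
                  (quadidx level (2 * i + 1) (2 * j)) (quadidx level (2 * i + 1) (2 * j + 1)))))
termination_by n.toNat
decreasing_by
  have h : PySem.Int.floordiv n 2 = n / 2 := PySem.Int.floordiv_eq_ediv_of_pos (by omega)
  simp only [h]; omega

def quadzip_alt (arr : List (List Int)) (x : Int) (y : Int) (d : Int) : List Int :=
  let level := (PySem.List.pyRange 0 d 1).map (fun i =>
    (PySem.List.pyRange 0 d 1).map (fun j =>
      [((PySem.List.pyGet? arr (x + i)).bind (fun row => PySem.List.pyGet? row (y + j))).getD 0]))
  quadidx (quadloop d level) 0 0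

-- ===== PRECONDITION & SPEC =====
-- d is a power of two (within the |d| ≤ 2^31 domain all claims quantify over)
def isPow2 (n : Nat) : Bool := (List.range 32).any (fun k => n == 2 ^ k)

-- d a power of two and every cell access arr[x+i][y+j] (0 ≤ i,j < d) a valid Python
-- index (negative wraparound allowed).  Pre_ excludes non-power-of-two d, on which A's
-- overlapping 3x3-of-quadrants recursion is an accident of range(x, x+d, d//2) and no
-- quadtree decomposition exists; it also excludes the inputs where A raises (d ≤ 0,
-- an out-of-range cell) or recurses forever (d < 0).
def Pre_quadzip (arr : List (List Int)) (x : Int) (y : Int) (d : Int) : Prop :=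
  0 < d ∧ isPow2 d.toNat = true ∧
  -- d ≤ 2*len(arr) is implied by the cell check (d distinct row indices must be valid
  -- Python indices, i.e. lie in [-len, len)); stating it first keeps Pre_ cheap to decide
  (if d ≤ 2 * (arr.length : Int) then
    ((List.range d.toNat).all (fun i =>
      ((PySem.List.pyGet? arr (x + i)).map (fun row =>
        (List.range d.toNat).all (fun j => (PySem.List.pyGet? row (y + j)).isSome))).getD false) = true)
   else False)
instance (arr : List (List Int)) (x : Int) (y : Int) (d : Int) : Decidable (Pre_quadzip arr x y d) := by unfold Pre_quadzip; infer_instance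

def pvWitness_quadzip : List (List Int) × Int × Int × Int := ([[0, 1], [1, 1]], 0, 0, 2)

def Spec_quadzip (arr : List (List Int)) (x : Int) (y : Int) (d : Int) (out : List Int) : Prop := out = quadzip_alt arr x y d
instance (arr : List (List Int)) (x : Int) (y : Int) (d : Int) (out : List Int) : Decidable (Spec_quadzip arr x y d out) := by unfold Spec_quadzip; infer_instance

-- ===== CLAIM (what is proved, stated in full; the proofs are below) =====
def Claim_equal_quadzip : Prop := ∀ (arr : List (List Int)) (x : Int) (y : Int) (d : Int), Dom_quadzip arr x y d → Pre_quadzip arr x y d → Spec_quadzip arr x y d (quadzip arr x y d)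

-- ===== LEMMAS AND PROOFS =====

-- the grid whose (i,j) entry is A's compressed block of size s at (x + i*s, y + j*s)
def gridOf (arr : List (List Int)) (x y s : Int) (n : Nat) : List (List (List Int)) :=
  (List.range n).map (fun i : Nat => (List.range n).map (fun j : Nat =>
    quadzip arr (x + (i : Int) * s) (y + (j : Int) * s) s))

lemma isPow2_spec : ∀ n : Nat, isPow2 n = true → ∃ k : Nat, n = 2 ^ k := by
  intro n h
  simp only [isPow2, List.any_eq_true, beq_iff_eq] at h
  obtain ⟨k, _, hk⟩ := h
  exact ⟨k, hk⟩

lemma pyRange_two (a s : Int) (hs : 0 < s) :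
    PySem.List.pyRange a (a + 2 * s) s = [a, a + s] := by
  rw [PySem.List.pyRange_of_pos _ _ hs]
  rw [if_pos (by omega)]
  have hdiv : (a + 2 * s - a + s - 1) / s = 2 := by
    rw [show a + 2 * s - a + s - 1 = s - 1 + 2 * s by ring,
        Int.add_mul_ediv_right _ _ (by omega),
        Int.ediv_eq_zero_of_lt (by omega) (by omega)]
    norm_num
  rw [hdiv]
  simp [List.range_succ]

lemma quadzip_step (arr : List (List Int)) (x y s : Int) (hs : 0 < s) :
    quadzip arr x y (2 * s) =
      quadmerge (quadzip arr x y s) (quadzip arr x (y + s) s)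
                (quadzip arr (x + s) y s) (quadzip arr (x + s) (y + s) s) := by
  rw [quadzip]
  rw [if_neg (by omega), if_neg (by omega)]
  have hfd : PySem.Int.floordiv (2 * s) 2 = s := by
    rw [PySem.Int.floordiv_eq_ediv_of_pos (by omega)]; omega
  simp only [hfd, pyRange_two _ _ hs, List.foldl_cons, List.foldl_nil, List.nil_append]
  simp [quadmerge, List.append_assoc]

lemma quadidx_gridOf (arr : List (List Int)) (x y s : Int) (n : Nat)
    (i j : Int) (hi0 : 0 ≤ i) (hi : i < (n : Int)) (hj0 : 0 ≤ j) (hj : j < (n : Int)) :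
    quadidx (gridOf arr x y s n) i j = quadzip arr (x + i * s) (y + j * s) s := by
  unfold quadidx gridOf
  rw [PySem.List.pyGet?_of_nonneg _ hi0, List.getElem?_map,
      List.getElem?_range (by omega : i.toNat < n)]
  simp only [Option.map_some, Option.getD_some]
  rw [PySem.List.pyGet?_of_nonneg _ hj0, List.getElem?_map,
      List.getElem?_range (by omega : j.toNat < n)]
  simp only [Option.map_some, Option.getD_some]
  rw [Int.toNat_of_nonneg hi0, Int.toNat_of_nonneg hj0]

lemma quadloop_inv (arr : List (List Int)) (x y : Int) :
    ∀ (k : Nat) (s : Int), 0 < s →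
      quadloop ((2 ^ k : Nat) : Int) (gridOf arr x y s (2 ^ k)) =
        [[quadzip arr x y ((2 ^ k : Nat) * s)]] := by
  intro k
  induction k with
  | zero =>
    intro s hs
    rw [quadloop, if_pos (by norm_num)]
    simp [gridOf]
  | succ k ih =>
    intro s hs
    have hN : 1 ≤ 2 ^ k := Nat.one_le_two_pow
    have h2 : ((2 ^ (k + 1) : Nat) : Int) = 2 * ((2 ^ k : Nat) : Int) := by
      push_cast [pow_succ]; ring
    rw [quadloop, if_neg (by omega)]
    have hm : PySem.Int.floordiv ((2 ^ (k + 1) : Nat) : Int) 2 = ((2 ^ k : Nat) : Int) := by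
      rw [PySem.Int.floordiv_eq_ediv_of_pos (by omega)]; omega
    simp only [hm]
    have hgrid : ((PySem.List.pyRange 0 ((2 ^ k : Nat) : Int) 1).map (fun i =>
        (PySem.List.pyRange 0 ((2 ^ k : Nat) : Int) 1).map (fun j =>
          quadmerge (quadidx (gridOf arr x y s (2 ^ (k + 1))) (2 * i) (2 * j))
                    (quadidx (gridOf arr x y s (2 ^ (k + 1))) (2 * i) (2 * j + 1))
                    (quadidx (gridOf arr x y s (2 ^ (k + 1))) (2 * i + 1) (2 * j))
                    (quadidx (gridOf arr x y s (2 ^ (k + 1))) (2 * i + 1) (2 * j + 1))))) =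
        gridOf arr x y (2 * s) (2 ^ k) := by
      rw [PySem.List.pyRange_one]
      rw [show ((((2 ^ k : Nat) : Int)) - 0).toNat = 2 ^ k by omega]
      conv_rhs => unfold gridOf
      rw [List.map_map]
      apply List.map_congr_left
      intro i hi
      rw [List.mem_range] at hi
      simp only [Function.comp]
      rw [List.map_map]
      apply List.map_congr_left
      intro j hj
      rw [List.mem_range] at hj
      simp only [Function.comp]
      have hi' : (i : Int) < ((2 ^ k : Nat) : Int) := by exact_mod_cast hi
      have hj' : (j : Int) < ((2 ^ k : Nat) : Int) := by exact_mod_cast hj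
      rw [quadidx_gridOf arr x y s _ _ _ (by omega) (by omega) (by omega) (by omega)]
      rw [quadidx_gridOf arr x y s _ _ _ (by omega) (by omega) (by omega) (by omega)]
      rw [quadidx_gridOf arr x y s _ _ _ (by omega) (by omega) (by omega) (by omega)]
      rw [quadidx_gridOf arr x y s _ _ _ (by omega) (by omega) (by omega) (by omega)]
      rw [quadzip_step arr _ _ s hs]
      congr 1 <;> ring_nf
    rw [hgrid, ih (2 * s) (by omega)]
    rw [show ((2 ^ k : Nat) : Int) * (2 * s) = ((2 ^ (k + 1) : Nat) : Int) * s by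
      push_cast [pow_succ]; ring]

lemma quadzip_alt_pow2 (arr : List (List Int)) (x y : Int) (k : Nat) :
    quadzip_alt arr x y ((2 ^ k : Nat) : Int) = quadzip arr x y ((2 ^ k : Nat) : Int) := by
  show quadidx (quadloop ((2 ^ k : Nat) : Int)
      ((PySem.List.pyRange 0 ((2 ^ k : Nat) : Int) 1).map (fun i =>
        (PySem.List.pyRange 0 ((2 ^ k : Nat) : Int) 1).map (fun j =>
          [((PySem.List.pyGet? arr (x + i)).bind (fun row => PySem.List.pyGet? row (y + j))).getD 0])))) 0 0 =
    quadzip arr x y ((2 ^ k : Nat) : Int)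
  have hN : 1 ≤ 2 ^ k := Nat.one_le_two_pow
  have hinit : ((PySem.List.pyRange 0 ((2 ^ k : Nat) : Int) 1).map (fun i =>
      (PySem.List.pyRange 0 ((2 ^ k : Nat) : Int) 1).map (fun j =>
        [((PySem.List.pyGet? arr (x + i)).bind (fun row => PySem.List.pyGet? row (y + j))).getD 0]))) =
      gridOf arr x y 1 (2 ^ k) := by
    rw [PySem.List.pyRange_one]
    rw [show ((((2 ^ k : Nat) : Int)) - 0).toNat = 2 ^ k by omega]
    unfold gridOf
    rw [List.map_map]
    apply List.map_congr_left
    intro i _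
    simp only [Function.comp]
    rw [List.map_map]
    apply List.map_congr_left
    intro j _
    simp only [Function.comp]
    rw [quadzip, if_pos rfl]
    norm_num
  rw [hinit, quadloop_inv arr x y k 1 (by norm_num)]
  simp [quadidx]

-- ===== VERDICT (by name: the statement is the Claim_ definition above) =====
theorem quadzip_spec : Claim_equal_quadzip := by
  intro arr x y d _ hpre
  obtain ⟨hd, hpow, _⟩ := hpre
  obtain ⟨k, hk⟩ := isPow2_spec d.toNat hpow
  have hd' : d = ((2 ^ k : Nat) : Int) := by omega
  unfold Spec_quadzip
  rw [hd', quadzip_alt_pow2]
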